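-- pv_equiv track=rewrite | github.com/imjinshuo/RulER | scripts/RQ3/utils.py | line2stmt
-- ===== SOURCE A (Python) =====
-- def line2stmt(stmt_list_pos):
--     line2stmt = {}
--     for stmt_id, stmt_pos in enumerate(stmt_list_pos):
--         for pos in stmt_pos:
--             if pos[0] not in line2stmt:
--                 line2stmt[pos[0]] = [stmt_id]
--             elif stmt_id not in line2stmt[pos[0]]:
--                 line2stmt[pos[0]].append(stmt_id)
--     return line2stmt
-- ===== SOURCE B (Python) =====
-- def line2stmt(stmt_list_pos):
--     # Two staged passes instead of A's incremental dict building: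
--     # pass 1: distinct line numbers in first-appearance order;
--     # pass 2: for each line, brute-scan the statement list for statements touching it.
--     order = list(dict.fromkeys(pos[0] for stmt_pos in stmt_list_pos for pos in stmt_pos))
--     return {line: [stmt_id for stmt_id, stmt_pos in enumerate(stmt_list_pos)
--                    if any(pos[0] == line for pos in stmt_pos)]
--             for line in order}
-- ===== Notes on version B (the rewrite author's own statement) =====
-- stated objective: alternative
-- what changed: Replaces A's single incremental pass (dict lookup-or-append with an in-value membership dedupe branch) by two staged passes with no dict mutation: first compute the distinct line numbers in first-appearance order, then build each line's value by re-scanning the whole statement list for the statements that touch that line (correct because A's value lists are exactly the increasing enumerate ids of those statements).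
import Mathlib
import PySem

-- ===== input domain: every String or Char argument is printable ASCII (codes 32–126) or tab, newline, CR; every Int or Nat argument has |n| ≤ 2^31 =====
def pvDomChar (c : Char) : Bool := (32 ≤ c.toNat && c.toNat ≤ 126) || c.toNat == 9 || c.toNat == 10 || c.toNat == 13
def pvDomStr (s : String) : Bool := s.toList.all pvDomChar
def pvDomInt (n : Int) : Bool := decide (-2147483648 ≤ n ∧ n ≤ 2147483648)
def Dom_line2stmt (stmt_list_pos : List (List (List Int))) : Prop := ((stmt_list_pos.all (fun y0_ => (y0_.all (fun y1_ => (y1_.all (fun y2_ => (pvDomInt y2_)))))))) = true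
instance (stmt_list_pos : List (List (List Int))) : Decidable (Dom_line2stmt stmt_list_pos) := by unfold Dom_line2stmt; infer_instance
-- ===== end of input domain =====

-- B replaces A's single incremental dict-building pass by two staged passes: distinct lines in first-appearance order, then a per-line rescan of the statement list (objective: alternative decomposition, same result).

-- ===== PORT A =====
def line2stmt (stmt_list_pos : List (List (List Int))) : List (Int × List Int) :=
  ((PySem.List.enumerate stmt_list_pos).foldl
    (fun d p => p.2.foldl
      (fun d pos =>
        match PySem.List.pyGet? pos 0 with  -- pos[0]; none = IndexError, excluded by Pre_
        | none => d
        | some line =>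
          match PySem.Dict.get? d line with
          | none => d.insert line [p.1]
          | some v => if p.1 ∈ v then d else d.insert line (v ++ [p.1])) d)
    PySem.Dict.empty).items

-- ===== PORT B =====
def line2stmt_alt (stmt_list_pos : List (List (List Int))) : List (Int × List Int) :=
  let order := PySem.List.dedup (stmt_list_pos.flatMap (fun stmt_pos =>
    stmt_pos.filterMap (fun pos => PySem.List.pyGet? pos 0)))  -- pos[0]; none = IndexError, excluded by Pre_
  order.map (fun line =>
    (line, (PySem.List.enumerate stmt_list_pos).filterMap (fun p =>
      if p.2.any (fun pos => PySem.List.pyGet? pos 0 == some line) then some p.1 else none)))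

-- ===== PRECONDITION & SPEC =====
-- Pre_ excludes inputs containing an empty position list, on which Python A (pos[0]) raises IndexError.
def Pre_line2stmt (stmt_list_pos : List (List (List Int))) : Prop :=
  ∀ g ∈ stmt_list_pos, ∀ pos ∈ g, pos ≠ ([] : List Int)
instance (stmt_list_pos : List (List (List Int))) : Decidable (Pre_line2stmt stmt_list_pos) := by unfold Pre_line2stmt; infer_instance
def pvWitness_line2stmt : List (List (List Int)) := [[[1, 2], [3]], [[1]]]

def Spec_line2stmt (stmt_list_pos : List (List (List Int))) (out : List (Int × List Int)) : Prop := out = line2stmt_alt stmt_list_pos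
instance (stmt_list_pos : List (List (List Int))) (out : List (Int × List Int)) : Decidable (Spec_line2stmt stmt_list_pos out) := by unfold Spec_line2stmt; infer_instance

-- ===== CLAIM (what is proved, stated in full; the proofs are below) =====
def Claim_equal_line2stmt : Prop := ∀ (stmt_list_pos : List (List (List Int))), Dom_line2stmt stmt_list_pos → Pre_line2stmt stmt_list_pos → Spec_line2stmt stmt_list_pos (line2stmt stmt_list_pos)

-- ===== LEMMAS AND PROOFS =====

-- A's loop body, as a step on a flattened (line, stmt_id) pair.
def pvStepA (d : PySem.Dict Int (List Int)) (q : Int × Int) : PySem.Dict Int (List Int) :=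
  match PySem.Dict.get? d q.1 with
  | none => d.insert q.1 [q.2]
  | some v => if q.2 ∈ v then d else d.insert q.1 (v ++ [q.2])

def pvPairs (sp : List (List (List Int))) : List (Int × Int) :=
  (PySem.List.enumerate sp).flatMap
    (fun p => p.2.filterMap (fun pos =>
      (PySem.List.pyGet? pos 0).map (fun line => (line, p.1))))

-- the dedupe-append fold A performs on one value list
def pvVF (v : List Int) (ss : List Int) : List Int :=
  ss.foldl (fun v s => if s ∈ v then v else v ++ [s]) v

theorem pvInnerFold (g : List (List Int)) (sid : Int) : ∀ (d : PySem.Dict Int (List Int)),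
    g.foldl (fun d pos =>
      match PySem.List.pyGet? pos 0 with
      | none => d
      | some line => pvStepA d (line, sid)) d
    = (g.filterMap (fun pos =>
        (PySem.List.pyGet? pos 0).map (fun line => (line, sid)))).foldl pvStepA d := by
  induction g with
  | nil => intro d; rfl
  | cons pos g ih =>
    intro d
    cases h : PySem.List.pyGet? pos 0 <;> simp [List.foldl_cons, h, ih]

theorem pvOuterFold (l : List (Int × List (List Int))) : ∀ (d : PySem.Dict Int (List Int)),
    l.foldl (fun d p => p.2.foldl
      (fun d pos =>
        match PySem.List.pyGet? pos 0 with
        | none => d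
        | some line => pvStepA d (line, p.1)) d) d
    = (l.flatMap (fun p => p.2.filterMap (fun pos =>
        (PySem.List.pyGet? pos 0).map (fun line => (line, p.1))))).foldl pvStepA d := by
  induction l with
  | nil => intro d; rfl
  | cons p l ih =>
    intro d
    rw [List.foldl_cons, List.flatMap_cons, List.foldl_append, pvInnerFold, ih]

-- the value stored at key l after A's fold
theorem pvGetD (l : Int) (qs : List (Int × Int)) : ∀ (d : PySem.Dict Int (List Int)),
    (qs.foldl pvStepA d).getD l []
    = pvVF (d.getD l []) ((qs.filter (fun q => q.1 == l)).map (·.2)) := by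
  induction qs with
  | nil => intro d; rfl
  | cons q qs ih =>
    intro d
    rw [List.foldl_cons, ih]
    by_cases hl : q.1 = l
    · subst hl
      simp only [List.filter_cons, beq_self_eq_true, if_true, List.map_cons, pvVF, List.foldl_cons]
      cases hget : PySem.Dict.get? d q.1 with
      | none =>
        have h0 : d.getD q.1 [] = [] := by
          rw [PySem.Dict.getD_eq_get?_getD, hget]; rfl
        simp [pvStepA, hget, h0, PySem.Dict.getD_insert_self]
      | some v =>
        have h0 : d.getD q.1 [] = v := by
          rw [PySem.Dict.getD_eq_get?_getD, hget]; rfl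
        by_cases hm : q.2 ∈ v
        · simp [pvStepA, hget, hm, h0]
        · simp [pvStepA, hget, hm, h0, PySem.Dict.getD_insert_self]
    · have hfilter : (q :: qs).filter (fun q => q.1 == l) = qs.filter (fun q => q.1 == l) := by
        simp [hl]
      have hstep : (pvStepA d q).getD l [] = d.getD l [] := by
        unfold pvStepA
        cases hget : PySem.Dict.get? d q.1 with
        | none => rw [PySem.Dict.getD_insert_of_ne _ _ _ (fun h => hl h.symm)]
        | some v =>
          by_cases hm : q.2 ∈ v
          · simp [hm]
          · simp only [hm, if_false]
            rw [PySem.Dict.getD_insert_of_ne _ _ _ (fun h => hl h.symm)]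
      rw [hstep]
      · congr 1
        simp [hl]

-- the keys after A's fold
theorem pvKeys (qs : List (Int × Int)) : ∀ (d : PySem.Dict Int (List Int)),
    (qs.foldl pvStepA d).keys = PySem.Set.update d.keys (qs.map (·.1)) := by
  induction qs with
  | nil => intro d; rfl
  | cons q qs ih =>
    intro d
    rw [List.foldl_cons, ih, List.map_cons, PySem.Set.update_cons]
    congr 1
    unfold pvStepA
    cases hget : PySem.Dict.get? d q.1 with
    | none =>
      have hc : d.contains q.1 = false := by
        rw [PySem.Dict.contains_eq_isSome_get?, hget]; rfl
      have hnm : q.1 ∉ d.keys := by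
        intro hm
        rw [← PySem.Dict.contains_iff_mem_keys d q.1] at hm
        rw [hc] at hm; exact Bool.false_ne_true hm
      rw [PySem.Dict.keys_insert_of_not_contains _ _ hc, PySem.Set.add_of_not_mem hnm]
    | some v =>
      have hc : d.contains q.1 = true := by
        rw [PySem.Dict.contains_eq_isSome_get?, hget]; rfl
      have hm : q.1 ∈ d.keys := (PySem.Dict.contains_iff_mem_keys d q.1).mp hc
      by_cases hmem : q.2 ∈ v
      · simp [hmem, PySem.Set.add_of_mem hm]
      · simp only [if_neg hmem]
        rw [PySem.Dict.keys_insert_of_contains _ _ hc, PySem.Set.add_of_mem hm]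

-- flatMap over enumerate that ignores the index is flatMap over the list
theorem pvFlatEnum {α : Type} (G : List (List Int) → List α) (sp : List (List (List Int))) :
    ∀ (s : Int), (PySem.List.enumerate sp s).flatMap (fun p => G p.2) = sp.flatMap G := by
  induction sp with
  | nil => intro s; rfl
  | cons g sp ih =>
    intro s
    rw [PySem.List.enumerate_cons, List.flatMap_cons, List.flatMap_cons, ih]

-- the line numbers of the flattened pairs are the flattened pos[0]'s
theorem pvLines (sp : List (List (List Int))) :
    (pvPairs sp).map (·.1)
    = sp.flatMap (fun g => g.filterMap (fun pos => PySem.List.pyGet? pos 0)) := by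
  unfold pvPairs
  rw [List.map_flatMap]
  rw [show (fun p : Int × List (List Int) =>
        ((p.2.filterMap (fun pos => (PySem.List.pyGet? pos 0).map (fun line => (line, p.1)))).map (·.1)))
      = (fun p : Int × List (List Int) => p.2.filterMap (fun pos => PySem.List.pyGet? pos 0)) from ?_]
  · exact pvFlatEnum _ sp 0
  · funext p
    rw [List.map_filterMap]
    congr 1
    funext pos
    cases PySem.List.pyGet? pos 0 <;> rfl

-- per-statement count of positions on line l
def pvCnt (l : Int) (g : List (List Int)) : Nat :=
  List.count l (g.filterMap (fun pos => PySem.List.pyGet? pos 0))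

theorem pvBlock (l : Int) (i : Int) (g : List (List Int)) :
    ((g.filterMap (fun pos => (PySem.List.pyGet? pos 0).map (fun line => (line, i)))).filter
      (fun q => q.1 == l)).map (·.2) = List.replicate (pvCnt l g) i := by
  induction g with
  | nil => rfl
  | cons pos g ih =>
    unfold pvCnt at *
    cases h : PySem.List.pyGet? pos 0 with
    | none => simp [h, ih]
    | some y =>
      by_cases hy : y = l
      · subst hy
        simp [h, ih, List.replicate_succ]
      · simp [h, hy, ih]

theorem pvVF_mem (i : Int) (c : Nat) : ∀ (v : List Int), i ∈ v → pvVF v (List.replicate c i) = v := by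
  induction c with
  | zero => intro v _; rfl
  | succ c ih =>
    intro v hm
    rw [List.replicate_succ]
    unfold pvVF
    rw [List.foldl_cons, if_pos hm]
    exact ih v hm

theorem pvVF_rep (i : Int) (c : Nat) (hc : 0 < c) (v : List Int) (hm : i ∉ v) :
    pvVF v (List.replicate c i) = v ++ [i] := by
  obtain ⟨c', rfl⟩ := Nat.exists_eq_succ_of_ne_zero (Nat.pos_iff_ne_zero.mp hc)
  rw [List.replicate_succ]
  unfold pvVF
  rw [List.foldl_cons, if_neg hm]
  exact pvVF_mem i c' (v ++ [i]) (List.mem_append.mpr (Or.inr (List.mem_singleton.mpr rfl)))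

theorem pvVF_append (v : List Int) (a b : List Int) : pvVF v (a ++ b) = pvVF (pvVF v a) b := by
  unfold pvVF; rw [List.foldl_append]

theorem pvAnyCnt (l : Int) (g : List (List Int)) :
    (g.any (fun pos => PySem.List.pyGet? pos 0 == some l) = true) ↔ 0 < pvCnt l g := by
  unfold pvCnt
  rw [List.count_pos_iff, List.any_eq_true]
  constructor
  · rintro ⟨pos, hp, hc⟩
    exact List.mem_filterMap.mpr ⟨pos, hp, by simpa using hc⟩
  · intro hm
    obtain ⟨pos, hp, hc⟩ := List.mem_filterMap.mp hm
    exact ⟨pos, hp, by simpa using hc⟩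

-- the crux: A's dedupe-append fold over the flattened ids at line l computes B's per-line rescan
theorem pvMain (l : Int) (L : List (Int × List (List Int))) :
    ∀ (v : List Int), (L.map (·.1)).Nodup → (∀ p ∈ L, p.1 ∉ v) →
    pvVF v (L.flatMap (fun p => List.replicate (pvCnt l p.2) p.1))
    = v ++ L.filterMap (fun p =>
        if p.2.any (fun pos => PySem.List.pyGet? pos 0 == some l) then some p.1 else none) := by
  induction L with
  | nil => intro v _ _; simp [pvVF]
  | cons p L ih =>
    intro v hnd hnm
    rw [List.flatMap_cons, pvVF_append, List.filterMap_cons]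
    by_cases hc : 0 < pvCnt l p.2
    · have hany : p.2.any (fun pos => PySem.List.pyGet? pos 0 == some l) = true :=
        (pvAnyCnt l p.2).mpr hc
      rw [hany, if_pos rfl]
      rw [pvVF_rep p.1 _ hc v (hnm p (List.mem_cons_self))]
      rw [ih (v ++ [p.1]) (List.nodup_cons.mp (by simpa using hnd)).2 ?hnm2]
      · simp
      case hnm2 =>
        intro q hq hmem
        rcases List.mem_append.mp hmem with h | h
        · exact hnm q (List.mem_cons_of_mem _ hq) h
        · have : q.1 = p.1 := List.mem_singleton.mp h
          have hne : p.1 ∉ L.map (·.1) := (List.nodup_cons.mp (by simpa using hnd)).1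
          exact hne (this ▸ List.mem_map.mpr ⟨q, hq, rfl⟩)
    · have hany : p.2.any (fun pos => PySem.List.pyGet? pos 0 == some l) = false := by
        rw [← Bool.not_eq_true]
        intro h; exact hc ((pvAnyCnt l p.2).mp h)
      rw [hany]
      have hc0 : pvCnt l p.2 = 0 := Nat.eq_zero_of_not_pos hc
      rw [hc0, List.replicate_zero]
      simp only [if_false, Bool.false_eq_true]
      show pvVF (pvVF v []) _ = _
      rw [show pvVF v [] = v from rfl]
      exact ih v (List.nodup_cons.mp (by simpa using hnd)).2
        (fun q hq => hnm q (List.mem_cons_of_mem _ hq))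

-- the ids at line l among the flattened pairs, per statement blocks
theorem pvIdsAt (l : Int) (sp : List (List (List Int))) :
    ((pvPairs sp).filter (fun q => q.1 == l)).map (·.2)
    = (PySem.List.enumerate sp).flatMap (fun p => List.replicate (pvCnt l p.2) p.1) := by
  unfold pvPairs
  rw [List.filter_flatMap, List.map_flatMap]
  congr 1
  funext p
  exact pvBlock l p.1 p.2

theorem pvEnumNodup (sp : List (List (List Int))) :
    ((PySem.List.enumerate sp).map (·.1)).Nodup := by
  rw [List.nodup_iff_pairwise_ne, List.pairwise_map]
  exact (PySem.List.pairwise_lt_enumerate sp 0).imp (fun h => ne_of_lt h)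

theorem pvEq (sp : List (List (List Int))) : line2stmt sp = line2stmt_alt sp := by
  have hnd : ((pvPairs sp).foldl pvStepA PySem.Dict.empty).keys.Nodup := by
    rw [pvKeys, PySem.Dict.keys_empty, PySem.Set.update_nil_left]
    exact PySem.Set.nodup_ofList _
  have hA : line2stmt sp = ((pvPairs sp).foldl pvStepA PySem.Dict.empty).items := by
    show ((PySem.List.enumerate sp).foldl
      (fun d p => p.2.foldl
        (fun d pos =>
          match PySem.List.pyGet? pos 0 with
          | none => d
          | some line => pvStepA d (line, p.1)) d)
      PySem.Dict.empty).items = _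
    rw [pvOuterFold]
    rfl
  rw [hA, PySem.Dict.items_eq_map_keys _ hnd []]
  rw [pvKeys, PySem.Dict.keys_empty, PySem.Set.update_nil_left]
  show (PySem.Set.ofList ((pvPairs sp).map (·.1))).map _ = _
  unfold line2stmt_alt
  rw [← PySem.List.dedup_eq_ofList, pvLines]
  apply List.map_congr_left
  intro l _
  congr 1
  rw [pvGetD, PySem.Dict.getD_empty, pvIdsAt]
  rw [pvMain l _ [] (pvEnumNodup sp) (by simp)]
  simp

-- ===== VERDICT (by name: the statement is the Claim_ definition above) =====
theorem line2stmt_spec : Claim_equal_line2stmt := by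
  intro sp _ _
  exact pvEq sp
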